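-- pv_equiv track=rewrite | github.com/AbeTavarez/Prompt-Engineering | examples/nlp-rule-base-approach.py | pos_tagger
-- ===== SOURCE A (Python) =====
-- nouns = ["dog", "cat", "man", "woman", "ball", "sky"]
--
-- verbs = ["run", "eat", "play", "see", "bark"]
--
-- adjectives = ["blue", "fast", "tall", "bright"]
--
-- articles = ["the", "a", "an"]
--
-- def pos_tagger(sentence):
--     # Tokenize the sentence into words
--     words = sentence.lower().split()
--
--     # Initialize an empty list to store word-POS pairs
--     tagged_sentence = []
--
--     for word in words:
--         # Check for different parts of speech based on simple rules
--         if word in nouns: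
--             tagged_sentence.append((word, "NOUN"))
--         elif word in verbs:
--             tagged_sentence.append((word, "VERB"))
--         elif word in adjectives:
--             tagged_sentence.append((word, "ADJ"))
--         elif word in articles:
--             tagged_sentence.append((word, "ART"))
--         else:
--             tagged_sentence.append((word, "UNKNOWN"))  # For words not in our lists
--
--     return tagged_sentence
--
-- sentence = "The dog runs fast and sees the blue ball"
-- ===== SOURCE B (Python) =====
-- # B: staged overwrite passes per category over a parallel tag array, instead of a per-word if/elif cascade.
-- nouns = ["dog", "cat", "man", "woman", "ball", "sky"]
-- verbs = ["run", "eat", "play", "see", "bark"]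
-- adjectives = ["blue", "fast", "tall", "bright"]
-- articles = ["the", "a", "an"]
--
-- def pos_tagger(sentence):
--     words = sentence.lower().split()
--     tags = ["UNKNOWN"] * len(words)
--     for lexicon, tag in [(nouns, "NOUN"), (verbs, "VERB"), (adjectives, "ADJ"), (articles, "ART")]:
--         for i, word in enumerate(words):
--             if word in lexicon:
--                 tags[i] = tag
--     return list(zip(words, tags))
-- ===== Notes on version B (the rewrite author's own statement) =====
-- stated objective: alternative
-- what changed: B traverses by CATEGORY, not by word: it initializes a parallel tag array to UNKNOWN and runs one overwrite pass per lexicon over all words, then zips words with tags; correct because the four lexicons are pairwise disjoint, so pass order cannot change the result.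
import Mathlib
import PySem

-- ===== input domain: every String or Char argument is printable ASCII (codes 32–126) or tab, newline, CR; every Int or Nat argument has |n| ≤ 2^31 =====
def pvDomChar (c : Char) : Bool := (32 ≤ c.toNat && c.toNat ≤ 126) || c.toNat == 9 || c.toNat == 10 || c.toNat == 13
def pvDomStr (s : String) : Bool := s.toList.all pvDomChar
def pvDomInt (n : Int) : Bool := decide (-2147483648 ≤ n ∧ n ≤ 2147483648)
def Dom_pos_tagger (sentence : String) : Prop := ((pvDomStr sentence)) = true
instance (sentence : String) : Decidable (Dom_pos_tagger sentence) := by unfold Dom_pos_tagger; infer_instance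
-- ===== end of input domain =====

-- B traverses by category (staged overwrite passes over a parallel tag array) instead of A's per-word if/elif cascade; same cost class.

-- ===== PORT A =====
def pvNouns : List String := ["dog", "cat", "man", "woman", "ball", "sky"]
def pvVerbs : List String := ["run", "eat", "play", "see", "bark"]
def pvAdjectives : List String := ["blue", "fast", "tall", "bright"]
def pvArticles : List String := ["the", "a", "an"]

def pos_tagger (sentence : String) : List (String × String) :=
  let words := PySem.Str.split₀ (PySem.Str.lower sentence)
  let tagged_sentence : List (String × String) := []
  words.foldl (fun tagged_sentence word =>
    if word ∈ pvNouns then tagged_sentence ++ [(word, "NOUN")]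
    else if word ∈ pvVerbs then tagged_sentence ++ [(word, "VERB")]
    else if word ∈ pvAdjectives then tagged_sentence ++ [(word, "ADJ")]
    else if word ∈ pvArticles then tagged_sentence ++ [(word, "ART")]
    else tagged_sentence ++ [(word, "UNKNOWN")]) tagged_sentence

-- ===== PORT B =====
-- one category pass: 'for i, word in enumerate(words): if word in lexicon: tags[i] = tag'
def pvPass (words : List String) (tags : List String) (lexicon : List String) (tag : String) : List String :=
  (words.zip tags).map (fun wt => if wt.1 ∈ lexicon then tag else wt.2)

def pos_tagger_alt (sentence : String) : List (String × String) :=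
  let words := PySem.Str.split₀ (PySem.Str.lower sentence)
  let tags0 := words.map (fun _ => "UNKNOWN")
  let tags := [(pvNouns, "NOUN"), (pvVerbs, "VERB"), (pvAdjectives, "ADJ"), (pvArticles, "ART")].foldl
    (fun tags p => pvPass words tags p.1 p.2) tags0
  words.zip tags

-- ===== PRECONDITION & SPEC =====
def Spec_pos_tagger (sentence : String) (out : List (String × String)) : Prop := out = pos_tagger_alt sentence
instance (sentence : String) (out : List (String × String)) : Decidable (Spec_pos_tagger sentence out) := by unfold Spec_pos_tagger; infer_instance

-- ===== CLAIM (what is proved, stated in full; the proofs are below) =====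
def Claim_equal_pos_tagger : Prop := ∀ (sentence : String), Dom_pos_tagger sentence → Spec_pos_tagger sentence (pos_tagger sentence)

-- ===== LEMMAS AND PROOFS =====

-- a pass over a pointwise tag array is again pointwise
theorem pv_pass_map (ws : List String) (h : String → String) (lex : List String) (tag : String) :
    pvPass ws (ws.map h) lex tag = ws.map (fun w => if w ∈ lex then tag else h w) := by
  induction ws with
  | nil => rfl
  | cons w ws ih => simp [pvPass, List.zip_cons_cons] at ih ⊢; exact ih

theorem pv_zip_map (ws : List String) (h : String → String) :
    ws.zip (ws.map h) = ws.map (fun w => (w, h w)) := by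
  induction ws with
  | nil => rfl
  | cons w ws ih => simp [List.zip_cons_cons, ih]

-- A's cascade equals the reverse-priority stacked conditionals (the lexicons are pairwise disjoint)
theorem pv_tag_eq (w : String) :
    (if w ∈ pvArticles then "ART"
     else if w ∈ pvAdjectives then "ADJ"
     else if w ∈ pvVerbs then "VERB"
     else if w ∈ pvNouns then "NOUN" else "UNKNOWN")
    = (if w ∈ pvNouns then "NOUN"
       else if w ∈ pvVerbs then "VERB"
       else if w ∈ pvAdjectives then "ADJ"
       else if w ∈ pvArticles then "ART"
       else "UNKNOWN") := by
  by_cases h1 : w ∈ pvNouns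
  · rcases (by simpa [pvNouns] using h1 : w = "dog" ∨ w = "cat" ∨ w = "man" ∨ w = "woman" ∨ w = "ball" ∨ w = "sky") with rfl|rfl|rfl|rfl|rfl|rfl <;> rfl
  by_cases h2 : w ∈ pvVerbs
  · rcases (by simpa [pvVerbs] using h2 : w = "run" ∨ w = "eat" ∨ w = "play" ∨ w = "see" ∨ w = "bark") with rfl|rfl|rfl|rfl|rfl <;> rfl
  by_cases h3 : w ∈ pvAdjectives
  · rcases (by simpa [pvAdjectives] using h3 : w = "blue" ∨ w = "fast" ∨ w = "tall" ∨ w = "bright") with rfl|rfl|rfl|rfl <;> rfl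
  by_cases h4 : w ∈ pvArticles
  · rcases (by simpa [pvArticles] using h4 : w = "the" ∨ w = "a" ∨ w = "an") with rfl|rfl|rfl <;> rfl
  simp [h1, h2, h3, h4]

theorem pv_foldl_eq (ws : List String) (acc : List (String × String)) :
    ws.foldl (fun tagged_sentence word =>
      if word ∈ pvNouns then tagged_sentence ++ [(word, "NOUN")]
      else if word ∈ pvVerbs then tagged_sentence ++ [(word, "VERB")]
      else if word ∈ pvAdjectives then tagged_sentence ++ [(word, "ADJ")]
      else if word ∈ pvArticles then tagged_sentence ++ [(word, "ART")]
      else tagged_sentence ++ [(word, "UNKNOWN")]) acc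
    = acc ++ ws.map (fun w =>
        (w, if w ∈ pvNouns then "NOUN"
            else if w ∈ pvVerbs then "VERB"
            else if w ∈ pvAdjectives then "ADJ"
            else if w ∈ pvArticles then "ART"
            else "UNKNOWN")) := by
  induction ws generalizing acc with
  | nil => simp
  | cons w ws ih =>
    simp only [List.foldl_cons, List.map_cons, ih]
    split_ifs <;> simp

theorem pos_tagger_spec : Claim_equal_pos_tagger := by
  intro sentence _
  unfold Spec_pos_tagger pos_tagger pos_tagger_alt
  set ws := PySem.Str.split₀ (PySem.Str.lower sentence) with hws
  simp only [List.foldl_cons, List.foldl_nil]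
  rw [show ws.map (fun _ => "UNKNOWN") = ws.map (fun _ => "UNKNOWN") from rfl,
      pv_pass_map, pv_pass_map, pv_pass_map, pv_pass_map, pv_zip_map, pv_foldl_eq]
  simp only [List.nil_append]
  exact List.map_congr_left (fun w _ => Prod.ext rfl (pv_tag_eq w).symm)
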